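-- pv_equiv track=rewrite | github.com/Bek7477/uyishi_07.10 | v5.py | naqsh
-- ===== SOURCE A (Python) =====
-- def naqsh(colors):
--     if not colors:
--         return 0
--     time = 2
--     for i in range(1, len(colors)):
--         if colors[i] != colors[i - 1]:
--             time += 1
--         time += 2
--     return time
-- ===== SOURCE B (Python) =====
-- def naqsh(colors):
--     # Run-length view: time = 2*len(colors) + (number of maximal runs of equal
--     # colors) - 1, since each run boundary is exactly one adjacent color change.
--     n = len(colors)
--     if n == 0:
--         return 0
--     runs = 0
--     i = 0
--     while i < n:
--         runs += 1
--         j = i + 1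
--         while j < n and colors[j] == colors[i]:
--             j += 1
--         i = j
--     return 2 * n + runs - 1
-- ===== Notes on version B (the rewrite author's own statement) =====
-- stated objective: alternative
-- what changed: Instead of accumulating +2 and +1 per index, B views the list as maximal runs of equal colors: a two-pointer loop skips over each run to count the runs m, and returns the closed form 2*n + m - 1.
import Mathlib
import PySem

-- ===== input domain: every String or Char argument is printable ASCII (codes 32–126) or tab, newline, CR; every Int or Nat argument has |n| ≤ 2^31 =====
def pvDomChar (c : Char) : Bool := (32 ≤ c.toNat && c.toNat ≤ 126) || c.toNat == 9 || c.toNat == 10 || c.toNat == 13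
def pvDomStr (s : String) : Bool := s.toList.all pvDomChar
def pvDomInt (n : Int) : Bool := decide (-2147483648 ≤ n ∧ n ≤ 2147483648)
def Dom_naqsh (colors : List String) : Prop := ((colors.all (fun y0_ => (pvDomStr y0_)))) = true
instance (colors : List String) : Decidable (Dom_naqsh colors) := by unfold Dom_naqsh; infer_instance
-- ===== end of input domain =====

-- B replaces A's per-index accumulation with a run-skipping count of maximal equal runs
-- and the closed form 2*n + runs - 1 (alternative decomposition, same cost).


-- ===== PORT A =====
-- Port of A: the index loop from 1 to len-1, accumulating time (indices are always in
-- range, so pyGetD's default is never used).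
def naqsh (colors : List String) : Int :=
  if colors = [] then 0
  else
    (PySem.List.pyRange 1 (colors.length : Int) 1).foldl
      (fun time i =>
        (if PySem.List.pyGetD colors i "" ≠ PySem.List.pyGetD colors (i - 1) "" then time + 1
         else time) + 2)
      2

-- ===== PORT B =====
-- Inner while loop of B: skip the rest of the run of colors equal to x.
def naqshSkipRun (x : String) : List String → List String
  | [] => []
  | y :: t => if y = x then naqshSkipRun x t else y :: t

theorem naqshSkipRun_length_le (x : String) (l : List String) :
    (naqshSkipRun x l).length ≤ l.length := by
  induction l with
  | nil => simp [naqshSkipRun]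
  | cons y t ih =>
    unfold naqshSkipRun
    split
    · exact Nat.le_succ_of_le ih
    · exact Nat.le_refl _

-- Outer while loop of B: count the maximal runs of equal colors.
def naqshCountRuns : List String → Int
  | [] => 0
  | x :: t => 1 + naqshCountRuns (naqshSkipRun x t)
termination_by l => l.length
decreasing_by
  exact Nat.lt_succ_of_le (naqshSkipRun_length_le x t)

-- Port of B: 2*n + (number of runs) - 1 for nonempty input.
def naqsh_alt (colors : List String) : Int :=
  if colors = [] then 0
  else 2 * (colors.length : Int) + naqshCountRuns colors - 1

-- ===== PRECONDITION & SPEC =====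
def Spec_naqsh (colors : List String) (out : Int) : Prop := out = naqsh_alt colors
instance (colors : List String) (out : Int) : Decidable (Spec_naqsh colors out) := by unfold Spec_naqsh; infer_instance

-- ===== CLAIM (what is proved, stated in full; the proofs are below) =====
def Claim_equal_naqsh : Prop := ∀ (colors : List String), Dom_naqsh colors → Spec_naqsh colors (naqsh colors)

-- ===== LEMMAS AND PROOFS =====

-- Number of adjacent changes in x :: t, as a simple recursion.
def naqshChanges : String → List String → Int
  | _, [] => 0
  | x, y :: t => (if y ≠ x then 1 else 0) + naqshChanges y t

theorem naqshChanges_const (x y : String) (t : List String) (h : y = x) :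
    naqshChanges x (y :: t) = naqshChanges x t := by
  subst h
  cases t with
  | nil => simp [naqshChanges]
  | cons z t' => simp [naqshChanges]

-- The run count of a nonempty list is one more than its number of adjacent changes.
theorem naqshCountRuns_eq (t : List String) : ∀ x : String,
    naqshCountRuns (x :: t) = 1 + naqshChanges x t := by
  induction t with
  | nil => intro x; simp [naqshCountRuns, naqshSkipRun, naqshChanges]
  | cons y t' ih =>
    intro x
    by_cases h : y = x
    · have h1 : naqshCountRuns (x :: y :: t') = naqshCountRuns (x :: t') := by
        rw [naqshCountRuns, naqshSkipRun, if_pos h, ← naqshCountRuns]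
      rw [h1, ih x, naqshChanges_const x y t' h]
    · have h1 : naqshCountRuns (x :: y :: t') = 1 + naqshCountRuns (y :: t') := by
        rw [naqshCountRuns, naqshSkipRun, if_neg h]
      rw [h1, ih y]
      simp [naqshChanges, h]

-- The 0/1 indicator sum over indices 1..len-1 equals the number of adjacent changes.
theorem naqsh_ind_sum (a : String) (l : List String) :
    ((List.range l.length).map (fun k : Nat =>
        if PySem.List.pyGetD (a :: l) (1 + (k : Int)) "" ≠ PySem.List.pyGetD (a :: l) (k : Int) "" then (1 : Int) else 0)).sum
    = naqshChanges a l := by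
  induction l generalizing a with
  | nil => simp [naqshChanges]
  | cons b t ih =>
    simp only [List.length_cons]
    rw [List.range_succ_eq_map, List.map_cons, List.map_map, List.sum_cons]
    have hfun : ∀ k : Nat,
        ((fun k : Nat =>
            if PySem.List.pyGetD (a :: b :: t) (1 + (k : Int)) "" ≠ PySem.List.pyGetD (a :: b :: t) (k : Int) "" then (1 : Int) else 0)
          ∘ Nat.succ) k
        = (if PySem.List.pyGetD (b :: t) (1 + (k : Int)) "" ≠ PySem.List.pyGetD (b :: t) (k : Int) "" then (1 : Int) else 0) := by
      intro k
      have e1 : PySem.List.pyGetD (a :: b :: t) (1 + ((Nat.succ k : Nat) : Int)) ""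
          = PySem.List.pyGetD (b :: t) (1 + (k : Int)) "" := by
        have h1 : (1 + ((Nat.succ k : Nat) : Int)) = (((k + 2 : Nat)) : Int) := by push_cast; ring
        have h2 : (1 + (k : Int)) = (((k + 1 : Nat)) : Int) := by push_cast; ring
        rw [h1, h2, PySem.List.pyGetD_natCast, PySem.List.pyGetD_natCast, List.getD_cons_succ]
      have e2 : PySem.List.pyGetD (a :: b :: t) (((Nat.succ k : Nat)) : Int) ""
          = PySem.List.pyGetD (b :: t) ((k : Int)) "" := by
        rw [PySem.List.pyGetD_natCast, PySem.List.pyGetD_natCast, List.getD_cons_succ]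
      simp only [Function.comp_apply, e1, e2]
    rw [List.map_congr_left (fun k _ => hfun k), ih b]
    have h1 : PySem.List.pyGetD (a :: b :: t) (1 + ((0 : Nat) : Int)) "" = b := by
      have h : (1 + ((0 : Nat) : Int)) = (((1 : Nat)) : Int) := by norm_num
      rw [h, PySem.List.pyGetD_natCast]; rfl
    have h0 : PySem.List.pyGetD (a :: b :: t) ((0 : Nat) : Int) "" = a := by
      rw [PySem.List.pyGetD_natCast]; rfl
    rw [h1, h0]
    simp only [naqshChanges]

theorem naqsh_nonempty_eq (a : String) (l : List String) :
    naqsh (a :: l) = naqsh_alt (a :: l) := by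
  unfold naqsh naqsh_alt
  simp only [if_neg (List.cons_ne_nil a l)]
  have hf : (fun (time : Int) (i : Int) =>
        (if PySem.List.pyGetD (a :: l) i "" ≠ PySem.List.pyGetD (a :: l) (i - 1) "" then time + 1 else time) + 2)
      = fun (time : Int) (i : Int) =>
        time + ((if PySem.List.pyGetD (a :: l) i "" ≠ PySem.List.pyGetD (a :: l) (i - 1) "" then (1 : Int) else 0) + 2) := by
    funext time i; split_ifs <;> ring
  rw [hf, PySem.List.foldl_add, PySem.List.sum_map_add_int, PySem.List.sum_map_const_int,
    PySem.List.pyRange_one, List.map_map]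
  have hlen : ((((a :: l).length : Int) - 1).toNat) = l.length := by
    simp
  rw [hlen]
  have hfun : ∀ k : Nat,
      ((fun i : Int => if PySem.List.pyGetD (a :: l) i "" ≠ PySem.List.pyGetD (a :: l) (i - 1) "" then (1 : Int) else 0)
        ∘ (fun k : Nat => (1 : Int) + (k : Int))) k
      = (if PySem.List.pyGetD (a :: l) (1 + (k : Int)) "" ≠ PySem.List.pyGetD (a :: l) (k : Int) "" then (1 : Int) else 0) := by
    intro k
    have h : (1 + (k : Int)) - 1 = (k : Int) := by ring
    simp only [Function.comp_apply, h]
  rw [List.map_congr_left (fun k _ => hfun k), naqsh_ind_sum a l, naqshCountRuns_eq l a]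
  simp only [List.length_map, List.length_range, List.length_cons]
  push_cast
  ring

-- ===== VERDICT (by name: the statement is the Claim_ definition above) =====
theorem naqsh_spec : Claim_equal_naqsh := by
  unfold Claim_equal_naqsh Spec_naqsh
  intro colors _
  cases colors with
  | nil => rfl
  | cons a l => exact naqsh_nonempty_eq a l
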